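-- pv_equiv track=rewrite | github.com/YaluLiu/USDHydraCapture | tools/hydra_batch/runner.py | sanitize_file_name_token
-- ===== SOURCE A (Python) =====
-- def sanitize_file_name_token(token: str) -> str:
--     output = []
--     previous_was_separator = False
--     for char in token:
--         if char.isascii() and (char.isalnum() or char in "_-."):
--             output.append(char)
--             previous_was_separator = False
--         elif not previous_was_separator:
--             output.append("_")
--             previous_was_separator = True
--     return "".join(output)
-- ===== SOURCE B (Python) =====
-- import re
--
-- _INVALID_RUN = re.compile(r'[^A-Za-z0-9_.-]+')
--
-- def sanitize_file_name_token(token: str) -> str: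
--     return _INVALID_RUN.sub('_', token)
-- ===== Notes on version B (the rewrite author's own statement) =====
-- stated objective: idiomatic
-- what changed: Replaced A's per-character separator-flag state machine by a single regex substitution that rewrites each maximal run of characters outside [A-Za-z0-9_.-] to one underscore; no explicit loop or flag is maintained.
import Mathlib
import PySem

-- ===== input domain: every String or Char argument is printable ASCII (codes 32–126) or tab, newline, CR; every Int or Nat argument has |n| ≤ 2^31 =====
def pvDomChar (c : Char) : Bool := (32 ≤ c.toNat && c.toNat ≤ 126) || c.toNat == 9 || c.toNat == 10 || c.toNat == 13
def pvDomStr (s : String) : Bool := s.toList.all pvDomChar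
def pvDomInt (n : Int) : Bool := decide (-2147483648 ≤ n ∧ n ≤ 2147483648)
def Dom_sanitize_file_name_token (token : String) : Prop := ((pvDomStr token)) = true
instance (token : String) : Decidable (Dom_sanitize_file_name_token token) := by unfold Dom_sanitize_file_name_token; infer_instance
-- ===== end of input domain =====

-- B replaces A's separator-flag character loop by one regex substitution re.sub(r'[^A-Za-z0-9_.-]+', '_', token) (objective: idiomatic).

-- ===== PORT A =====
-- char.isascii() and (char.isalnum() or char in "_-.")
def pvValidA (c : Char) : Bool :=
  decide (c.toNat ≤ 127) && (PySem.Chars.isalnum c || "_-.".toList.contains c)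

def sanitize_file_name_token (token : String) : String :=
  let r := token.toList.foldl (fun (st : List Char × Bool) c =>
    if pvValidA c then (st.1 ++ [c], false)
    else if !st.2 then (st.1 ++ ['_'], true)
    else st) ([], false)
  String.mk r.1

-- ===== PORT B =====
-- the character class [A-Za-z0-9_.-] of Source B's pattern
def pvClassB (c : Char) : Bool :=
  ('A' ≤ c && c ≤ 'Z') || ('a' ≤ c && c ≤ 'z') || ('0' ≤ c && c ≤ '9')
    || c == '_' || c == '.' || c == '-'

-- hand-written model of re.sub(r'[^A-Za-z0-9_.-]+', '_', ·) (PySem has no regex):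
-- scan leftmost-first; at a position where the pattern matches, the greedy '+' match is
-- the maximal run of class-complement chars, replaced by '_', scanning resumes after it;
-- otherwise the char is copied and the search moves one position right.  Exact for this pattern.
def pvReSubGo : List Char → List Char
  | [] => []
  | c :: rest =>
    if pvClassB c then c :: pvReSubGo rest
    else '_' :: pvReSubGo (rest.dropWhile (fun d => !pvClassB d))
termination_by l => l.length
decreasing_by
  · simp
  · simp only [List.length_cons]
    exact Nat.lt_succ_of_le (List.length_dropWhile_le _ _)

def sanitize_file_name_token_alt (token : String) : String :=
  String.mk (pvReSubGo token.toList)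

-- ===== PRECONDITION & SPEC =====
def Spec_sanitize_file_name_token (token : String) (out : String) : Prop := out = sanitize_file_name_token_alt token
instance (token : String) (out : String) : Decidable (Spec_sanitize_file_name_token token out) := by unfold Spec_sanitize_file_name_token; infer_instance

-- ===== CLAIM (what is proved, stated in full; the proofs are below) =====
def Claim_equal_sanitize_file_name_token : Prop := ∀ (token : String), Dom_sanitize_file_name_token token → Spec_sanitize_file_name_token token (sanitize_file_name_token token)

-- ===== LEMMAS AND PROOFS =====
set_option maxRecDepth 4000 in
lemma pvValid_eq_of_dom (c : Char) (h : pvDomChar c = true) : pvValidA c = pvClassB c := by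
  have hle : c.toNat ≤ 126 := by
    simp [pvDomChar] at h
    omega
  have hall : ∀ n ∈ List.range 127, pvValidA (Char.ofNat n) = pvClassB (Char.ofNat n) := by decide
  have hc : Char.ofNat c.toNat = c := Char.ofNat_toNat c
  have := hall c.toNat (List.mem_range.mpr (by omega))
  simpa [hc] using this

-- A's fold, starting from any accumulator: flag false = append pvReSubGo, flag true = append
-- pvReSubGo of the list with its leading invalid run dropped.
lemma pvFold_eq (l : List Char) (hl : ∀ c ∈ l, pvDomChar c = true) : ∀ acc : List Char,
    (l.foldl (fun (st : List Char × Bool) c =>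
      if pvValidA c then (st.1 ++ [c], false)
      else if !st.2 then (st.1 ++ ['_'], true)
      else st) (acc, false)).1 = acc ++ pvReSubGo l
    ∧ (l.foldl (fun (st : List Char × Bool) c =>
      if pvValidA c then (st.1 ++ [c], false)
      else if !st.2 then (st.1 ++ ['_'], true)
      else st) (acc, true)).1 = acc ++ pvReSubGo (l.dropWhile (fun d => !pvClassB d)) := by
  induction l with
  | nil => intro acc; simp [pvReSubGo]
  | cons c rest ih =>
    intro acc
    have hc : pvValidA c = pvClassB c := pvValid_eq_of_dom c (hl c (by simp))
    have hrest : ∀ d ∈ rest, pvDomChar d = true := fun d hd => hl d (by simp [hd])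
    constructor
    · by_cases hv : pvClassB c = true
      · simp only [List.foldl_cons, hc, hv, if_pos, pvReSubGo, ← List.append_assoc]
        simpa [hv] using (ih hrest (acc ++ [c])).1
      · simp only [List.foldl_cons, hc, eq_false_of_ne_true hv, if_neg, Bool.not_false, if_pos,
          pvReSubGo, ← List.append_assoc]
        simpa [hv] using (ih hrest (acc ++ ['_'])).2
    · by_cases hv : pvClassB c = true
      · simp only [List.foldl_cons, hc, hv, if_pos, List.dropWhile, Bool.not_true, ← List.append_assoc]
        simpa [hv, pvReSubGo] using (ih hrest (acc ++ [c])).1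
      · simp only [List.foldl_cons, hc, eq_false_of_ne_true hv, if_neg, Bool.not_true, List.dropWhile]
        simpa [hv] using (ih hrest acc).2

-- ===== VERDICT (by name: the statement is the Claim_ definition above) =====
theorem sanitize_file_name_token_spec : Claim_equal_sanitize_file_name_token := by
  intro token hdom
  unfold Spec_sanitize_file_name_token sanitize_file_name_token sanitize_file_name_token_alt
  have hl : ∀ c ∈ token.toList, pvDomChar c = true := by
    simpa [Dom_sanitize_file_name_token, pvDomStr, List.all_eq_true] using hdom
  simpa using congrArg String.mk ((pvFold_eq token.toList hl []).1)
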